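-- pv_equiv track=rewrite | github.com/lucigrigo/University | 3rd Year/LFA - Automated and Formal Languages/Homework/Tema 1 - Glypho Interpreter/interpreter.py | decode_single_instr
-- ===== SOURCE A (Python) =====
-- def decode_single_instr(instruction):
--     dec = ""
--     apps = {}
--     free = 0
--
--     for c in instruction:
--         if not c in apps:
--             apps[c] = free
--             free += 1
--         dec = dec + str(apps[c])
--
--     return dec
-- ===== SOURCE B (Python) =====
-- def decode_single_instr(instruction):
--     # Stateless rule: the code of each character is the number of distinct
--     # characters occurring strictly before its first occurrence.
--     out = []
--     for c in instruction:
--         prefix = instruction[:instruction.index(c)]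
--         out.append(str(len(set(prefix))))
--     return ''.join(out)
-- ===== Notes on version B (the rewrite author's own statement) =====
-- stated objective: alternative
-- what changed: A's stateful single pass (a dict of assigned codes and a running counter mutated across iterations) is replaced by a stateless per-character rule computed independently for each position: the code of a character is len(set(prefix)) for the prefix before its first occurrence, found with index/slice/set and joined at the end.
import Mathlib
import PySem

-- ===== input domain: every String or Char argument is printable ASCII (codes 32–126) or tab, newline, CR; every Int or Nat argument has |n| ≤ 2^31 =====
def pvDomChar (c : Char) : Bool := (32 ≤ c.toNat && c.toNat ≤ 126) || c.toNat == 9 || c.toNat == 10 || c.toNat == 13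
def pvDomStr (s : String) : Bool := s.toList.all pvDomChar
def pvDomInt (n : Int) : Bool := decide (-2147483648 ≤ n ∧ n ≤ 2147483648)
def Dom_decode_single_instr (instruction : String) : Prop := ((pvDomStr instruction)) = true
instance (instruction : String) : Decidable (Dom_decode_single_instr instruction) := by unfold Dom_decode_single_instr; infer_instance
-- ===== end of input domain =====

-- B replaces A's stateful single pass (dict + counter accumulated across iterations) by a
-- stateless per-character rule: each character's code is the number of distinct characters
-- strictly before its first occurrence, computed independently (alternative decomposition).

-- ===== PORT A =====
-- state = (dec, apps, free); one step of A's for-loop body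
def decodeAStep (st : List Char × PySem.Dict Char Int × Int) (c : Char) :
    List Char × PySem.Dict Char Int × Int :=
  let apps := if st.2.1.contains c then st.2.1 else st.2.1.insert c st.2.2
  let free : Int := if st.2.1.contains c then st.2.2 else st.2.2 + 1
  (st.1 ++ PySem.Int.toChars (apps.getD c 0), apps, free)

def decode_single_instr (instruction : String) : String :=
  String.ofList (instruction.toList.foldl decodeAStep ([], PySem.Dict.empty, 0)).1

-- ===== PORT B =====
-- str(len(set(instruction[:instruction.index(c)]))): instruction.index(c) via
-- PySem.List.index? (none = ValueError, unreachable since c comes from instruction;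
-- the none branch only makes the function total); the slice [:j] with j : Nat is take j.
def altCode (cs : List Char) (c : Char) : List Char :=
  match PySem.List.index? cs c with
  | some j => PySem.Int.toChars ((PySem.Set.ofList (cs.take j)).length : Int)
  | none => []

def decode_single_instr_alt (instruction : String) : String :=
  let cs := instruction.toList
  String.ofList (PySem.Chars.join [] (cs.map (fun c => altCode cs c)))

-- ===== PRECONDITION & SPEC =====
def Spec_decode_single_instr (instruction : String) (out : String) : Prop := out = decode_single_instr_alt instruction
instance (instruction : String) (out : String) : Decidable (Spec_decode_single_instr instruction out) := by unfold Spec_decode_single_instr; infer_instance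

-- ===== CLAIM (what is proved, stated in full; the proofs are below) =====
def Claim_equal_decode_single_instr : Prop := ∀ (instruction : String), Dom_decode_single_instr instruction → Spec_decode_single_instr instruction (decode_single_instr instruction)

-- ===== LEMMAS AND PROOFS =====

theorem join_nil_eq_flatten (l : List (List Char)) : PySem.Chars.join [] l = l.flatten := by
  induction l with
  | nil => rfl
  | cons a t ih =>
    cases t with
    | nil => simp [PySem.Chars.join, List.intercalate]
    | cons b t' =>
      simp only [PySem.Chars.join, List.intercalate, List.intersperse] at ih ⊢
      simp_all

theorem ofList_snoc (p : List Char) (c : Char) :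
    PySem.Set.ofList (p ++ [c]) =
      if c ∈ PySem.Set.ofList p then PySem.Set.ofList p else PySem.Set.ofList p ++ [c] := by
  by_cases h : c ∈ PySem.Set.ofList p <;>
    simp [PySem.Set.ofList, List.foldl_append, PySem.Set.add] at *

-- altCode is stable under appending a character, for characters already present
theorem altCode_snoc_of_mem (cs : List Char) (x c : Char) (hc : c ∈ cs) :
    altCode (cs ++ [x]) c = altCode cs c := by
  unfold altCode
  rw [PySem.List.index?_append_of_mem _ hc]
  rcases h : PySem.List.index? cs c with _ | j
  · rfl
  · obtain ⟨pre, suf, heq, hlen, _⟩ := (PySem.List.index?_eq_some_iff cs c j).mp h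
    have hj : j ≤ cs.length := by subst heq; simp [← hlen]
    simp [List.take_append_of_le_length hj]

theorem altCode_snoc_self (cs : List Char) (c : Char) (hc : c ∉ cs) :
    altCode (cs ++ [c]) c = PySem.Int.toChars ((PySem.Set.ofList cs).length : Int) := by
  unfold altCode
  rw [show PySem.List.index? (cs ++ [c]) c = some cs.length from
    PySem.List.index?_append_singleton_self cs c hc]
  simp [List.take_append_of_le_length (le_refl cs.length)]

-- the characterisation of A's loop state after processing cs, in B's terms
theorem invA (cs : List Char) :
    (cs.foldl decodeAStep ([], PySem.Dict.empty, 0)).1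
        = (cs.map (fun d => altCode cs d)).flatten
    ∧ (∀ c, (cs.foldl decodeAStep ([], PySem.Dict.empty, 0)).2.1.contains c
        = decide (c ∈ cs))
    ∧ (∀ c, c ∈ cs →
        PySem.Int.toChars ((cs.foldl decodeAStep ([], PySem.Dict.empty, 0)).2.1.getD c 0)
          = altCode cs c)
    ∧ (cs.foldl decodeAStep ([], PySem.Dict.empty, 0)).2.2
        = ((PySem.Set.ofList cs).length : Int) := by
  induction cs using List.reverseRecOn with
  | nil =>
    refine ⟨rfl, ?_, ?_, rfl⟩
    · intro c; simp [PySem.Dict.contains, PySem.Dict.empty]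
    · intro c hc; cases hc
  | append_singleton cs c ih =>
    obtain ⟨ih1, ih2, ih3, ih4⟩ := ih
    simp only [List.foldl_append, List.foldl_cons, List.foldl_nil]
    have hmap : (cs.map (fun d => altCode (cs ++ [c]) d)) = cs.map (fun d => altCode cs d) :=
      List.map_congr_left (fun d hd => altCode_snoc_of_mem cs c d hd)
    by_cases hmem : c ∈ cs
    · have hcon : (cs.foldl decodeAStep ([], PySem.Dict.empty, 0)).2.1.contains c = true := by
        rw [ih2]; simp [hmem]
      simp only [decodeAStep, hcon, if_true]
      have hSet : c ∈ PySem.Set.ofList cs := (PySem.Set.mem_ofList cs c).mpr hmem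
      refine ⟨?_, ?_, ?_, ?_⟩
      · simp only [List.map_append, List.flatten_append, List.map_cons, List.map_nil,
          List.flatten_cons, List.flatten_nil, List.append_nil, hmap]
        rw [ih1, ih3 c hmem, altCode_snoc_of_mem cs c c hmem]
      · intro d; rw [ih2]
        by_cases hdc : d = c <;> simp [hdc, hmem]
      · intro d hd
        have hdcs : d ∈ cs := by
          rcases List.mem_append.mp hd with h | h
          · exact h
          · simp at h; subst h; exact hmem
        rw [ih3 d hdcs, altCode_snoc_of_mem cs c d hdcs]
      · rw [ih4, ofList_snoc, if_pos hSet]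
    · have hcon : (cs.foldl decodeAStep ([], PySem.Dict.empty, 0)).2.1.contains c = false := by
        rw [ih2]; simp [hmem]
      simp only [decodeAStep, hcon, if_false, Bool.false_eq_true]
      have hSet : c ∉ PySem.Set.ofList cs := fun h => hmem ((PySem.Set.mem_ofList cs c).mp h)
      refine ⟨?_, ?_, ?_, ?_⟩
      · simp only [List.map_append, List.flatten_append, List.map_cons, List.map_nil,
          List.flatten_cons, List.flatten_nil, List.append_nil, hmap]
        rw [ih1, PySem.Dict.getD_insert_self, ih4, altCode_snoc_self cs c hmem]
      · intro d
        rw [PySem.Dict.contains_insert, ih2]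
        by_cases hdc : d = c <;> simp [hdc]
      · intro d hd
        by_cases hdc : d = c
        · subst hdc
          rw [PySem.Dict.getD_insert_self, ih4, altCode_snoc_self cs d hmem]
        · have hdcs : d ∈ cs := by
            rcases List.mem_append.mp hd with h | h
            · exact h
            · simp at h; exact absurd h hdc
          rw [PySem.Dict.getD_insert_of_ne _ _ _ hdc, ih3 d hdcs,
            altCode_snoc_of_mem cs c d hdcs]
      · rw [ih4, ofList_snoc, if_neg hSet]
        simp [List.length_append]

-- ===== VERDICT (by name: the statement is the Claim_ definition above) =====
theorem decode_single_instr_spec : Claim_equal_decode_single_instr := by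
  intro instruction _
  unfold Spec_decode_single_instr decode_single_instr decode_single_instr_alt
  congr 1
  rw [(invA instruction.toList).1, join_nil_eq_flatten]
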